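-- pv_equiv track=rewrite | github.com/gguip1/CodetreeRecord | 250128/1이 되는 순간까지/until-the-moment-I-reach-one.py | func
-- ===== SOURCE A (Python) =====
-- def func(n, count=0):
--     if n == 1:
--         return count
--     else:
--         count += 1
--         if n % 2 == 0:
--             return func(n // 2, count)
--         else:
--             return func(n // 3, count)
-- ===== SOURCE B (Python) =====
-- def func(n, count=0):
--     traj = [n]
--     while traj[-1] != 1:
--         m = traj[-1]
--         traj.append(m // 2 if m % 2 == 0 else m // 3)
--     return count + len(traj) - 1
-- ===== Notes on version B (the rewrite author's own statement) =====
-- stated objective: alternative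
-- what changed: Replaces the accumulator-threading recursion with a staged computation: first materialise the whole trajectory of values as a list, then return count plus its length minus one.
import Mathlib
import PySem

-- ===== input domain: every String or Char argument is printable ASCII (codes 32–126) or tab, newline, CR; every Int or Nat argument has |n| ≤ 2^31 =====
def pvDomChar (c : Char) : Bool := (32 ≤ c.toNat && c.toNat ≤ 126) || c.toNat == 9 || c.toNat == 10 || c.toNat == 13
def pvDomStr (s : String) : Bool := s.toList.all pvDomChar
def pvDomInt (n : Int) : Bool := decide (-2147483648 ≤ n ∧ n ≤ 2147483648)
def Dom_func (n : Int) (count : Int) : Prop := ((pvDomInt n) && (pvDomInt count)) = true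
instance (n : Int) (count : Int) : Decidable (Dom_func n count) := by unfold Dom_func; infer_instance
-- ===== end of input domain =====

-- B replaces A's accumulator-threading recursion by a staged computation: build
-- the whole trajectory of values as a list, then return count + length - 1
-- ("alternative" decomposition, same cost).
-- Pre_ excludes n ≤ 0, where A raises RecursionError (and B would loop forever).

-- ===== PORT A =====
-- A's recursion on n, run on n.toNat (exact for the admitted inputs n ≥ 1, where
-- n and count follow Python's values step for step; the `m ≤ 1` base case only
-- makes the recursion terminate, m = 0 is unreachable under Pre_).
def funcGo (m : Nat) (count : Int) : Int :=
  if h : m ≤ 1 then count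
  else
    if m % 2 = 0 then funcGo (m / 2) (count + 1)
    else funcGo (m / 3) (count + 1)
  termination_by m
  decreasing_by
  · exact Nat.div_lt_self (by omega) (by omega)
  · exact Nat.div_lt_self (by omega) (by omega)

def func (n : Int) (count : Int) : Int := funcGo n.toNat count

-- ===== PORT B =====
-- B's trajectory list: all values visited from m down to 1 inclusive.
def traj (m : Nat) : List Nat :=
  if h : m ≤ 1 then [m]
  else m :: traj (if m % 2 = 0 then m / 2 else m / 3)
  termination_by m
  decreasing_by
    split <;> exact Nat.div_lt_self (by omega) (by omega)

def func_alt (n : Int) (count : Int) : Int :=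
  count + ((traj n.toNat).length : Int) - 1

-- ===== PRECONDITION & SPEC =====
-- Pre_ excludes exactly n ≤ 0, where the Python A raises RecursionError.
def Pre_func (n : Int) (count : Int) : Prop := 1 ≤ n
instance (n : Int) (count : Int) : Decidable (Pre_func n count) := by unfold Pre_func; infer_instance
def pvWitness_func : Int × Int := (12, 0)

def Spec_func (n : Int) (count : Int) (out : Int) : Prop := out = func_alt n count
instance (n : Int) (count : Int) (out : Int) : Decidable (Spec_func n count out) := by unfold Spec_func; infer_instance

-- ===== CLAIM (what is proved, stated in full; the proofs are below) =====
def Claim_equal_func : Prop := ∀ (n : Int) (count : Int), Dom_func n count → Pre_func n count → Spec_func n count (func n count)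

-- ===== LEMMAS AND PROOFS =====
theorem funcGo_eq_traj : ∀ (m : Nat) (c : Int), funcGo m c = c + ((traj m).length : Int) - 1 := by
  intro m
  induction m using Nat.strong_induction_on with
  | _ m ih =>
    intro c
    rw [funcGo.eq_def, traj.eq_def]
    by_cases h : m ≤ 1
    · simp [h]
    · simp only [h, dif_neg, not_false_iff, List.length_cons]
      by_cases h2 : m % 2 = 0
      · simp only [h2, if_pos]
        rw [ih (m / 2) (Nat.div_lt_self (by omega) (by omega))]
        push_cast; ring
      · simp only [h2, if_neg, not_false_iff]
        rw [ih (m / 3) (Nat.div_lt_self (by omega) (by omega))]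
        push_cast; ring

-- ===== VERDICT (by name: the statement is the Claim_ definition above) =====
theorem func_spec : Claim_equal_func := by
  intro n count _ _
  unfold Spec_func func func_alt
  exact funcGo_eq_traj n.toNat count
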